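-- pv_equiv track=rewrite | github.com/swarajsah143/Resume_based-_Job_prediction | app.py | calculate_resume_strength
-- ===== SOURCE A (Python) =====
-- def calculate_resume_strength(skills, education, experience, text):
--     """Calculate resume strength score."""
--     score = 0
--     max_score = 100
--
--     # Skills (40 points)
--     skill_count = len(skills)
--     if skill_count >= 10:
--         score += 40
--     elif skill_count >= 7:
--         score += 30
--     elif skill_count >= 4:
--         score += 20
--     elif skill_count >= 1:
--         score += 10
--
--     # Education (20 points)
--     edu_count = len(education)
--     if edu_count >= 3:
--         score += 20
--     elif edu_count >= 2:
--         score += 15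
--     elif edu_count >= 1:
--         score += 10
--
--     # Experience (25 points)
--     exp_count = len(experience)
--     if exp_count >= 5:
--         score += 25
--     elif exp_count >= 3:
--         score += 18
--     elif exp_count >= 1:
--         score += 10
--
--     # Keywords and quality (15 points)
--     text_lower = text.lower()
--     quality_keywords = ["project", "certification", "award", "achievement",
--                         "github", "portfolio", "linkedin", "volunteer", "publication"]
--     found_quality = sum(1 for k in quality_keywords if k in text_lower)
--     score += min(found_quality * 3, 15)
--
--     return min(score, max_score)
-- ===== SOURCE B (Python) =====
-- def calculate_resume_strength(skills, education, experience, text):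
--     """Cumulative-increment scoring: every met threshold adds its increment
--     (equivalent to the tiered ladder because increments telescope)."""
--     increments = [
--         (len(skills),     [(1, 10), (4, 10), (7, 10), (10, 10)]),
--         (len(education),  [(1, 10), (2, 5),  (3, 5)]),
--         (len(experience), [(1, 10), (3, 8),  (5, 7)]),
--     ]
--     score = sum(pts for count, steps in increments
--                     for threshold, pts in steps if count >= threshold)
--     tl = text.lower()
--     keywords = ["project", "certification", "award", "achievement",
--                 "github", "portfolio", "linkedin", "volunteer", "publication"]
--     found = sum(k in tl for k in keywords)
--     return min(score + 3 * min(found, 5), 100)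
-- ===== Notes on version B (the rewrite author's own statement) =====
-- stated objective: alternative
-- what changed: Replaces the first-match if/elif tier ladders by a cumulative-increment sum: every met threshold contributes a telescoped increment (skills 10+10+10+10, education 10+5+5, experience 10+8+7), with the keyword bonus rewritten as 3*min(found,5); no first-match scan remains.
import Mathlib
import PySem

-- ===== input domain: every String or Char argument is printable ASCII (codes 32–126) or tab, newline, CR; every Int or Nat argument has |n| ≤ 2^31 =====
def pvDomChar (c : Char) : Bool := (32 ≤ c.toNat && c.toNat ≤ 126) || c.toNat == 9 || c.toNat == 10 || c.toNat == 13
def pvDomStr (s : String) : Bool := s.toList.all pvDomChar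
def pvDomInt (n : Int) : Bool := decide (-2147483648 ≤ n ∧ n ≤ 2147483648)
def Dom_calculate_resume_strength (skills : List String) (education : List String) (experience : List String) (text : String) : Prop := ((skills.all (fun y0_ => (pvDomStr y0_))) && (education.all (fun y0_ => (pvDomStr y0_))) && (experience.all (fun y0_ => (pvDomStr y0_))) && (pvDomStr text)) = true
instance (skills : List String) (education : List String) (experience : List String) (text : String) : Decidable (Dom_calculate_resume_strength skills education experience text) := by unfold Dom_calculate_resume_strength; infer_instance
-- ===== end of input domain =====

-- B replaces A's first-match if/elif tier ladders by a cumulative-increment sum over all met thresholds; objective: alternative.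

-- ===== PORT A =====
def calculate_resume_strength (skills : List String) (education : List String) (experience : List String) (text : String) : Int :=
  let score : Int := 0
  let max_score : Int := 100
  let skill_count : Int := skills.length
  let score :=
    if skill_count ≥ 10 then score + 40
    else if skill_count ≥ 7 then score + 30
    else if skill_count ≥ 4 then score + 20
    else if skill_count ≥ 1 then score + 10
    else score
  let edu_count : Int := education.length
  let score :=
    if edu_count ≥ 3 then score + 20
    else if edu_count ≥ 2 then score + 15
    else if edu_count ≥ 1 then score + 10
    else score
  let exp_count : Int := experience.length
  let score :=
    if exp_count ≥ 5 then score + 25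
    else if exp_count ≥ 3 then score + 18
    else if exp_count ≥ 1 then score + 10
    else score
  let text_lower := PySem.Str.lower text
  let quality_keywords : List String := ["project", "certification", "award", "achievement",
      "github", "portfolio", "linkedin", "volunteer", "publication"]
  let found_quality : Int :=
    quality_keywords.foldl (fun acc k => if PySem.Str.isIn k text_lower then acc + 1 else acc) 0
  let score := score + min (found_quality * 3) 15
  min score max_score

-- ===== PORT B =====
def calculate_resume_strength_alt (skills : List String) (education : List String) (experience : List String) (text : String) : Int :=
  let increments : List (Int × List (Int × Int)) :=
    [ ((skills.length : Int),     [(1, 10), (4, 10), (7, 10), (10, 10)]),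
      ((education.length : Int),  [(1, 10), (2, 5),  (3, 5)]),
      ((experience.length : Int), [(1, 10), (3, 8),  (5, 7)]) ]
  let score : Int :=
    (increments.flatMap (fun cs => ((cs.2.filter (fun tp => cs.1 ≥ tp.1)).map Prod.snd))).sum
  let tl := PySem.Str.lower text
  let keywords : List String := ["project", "certification", "award", "achievement",
      "github", "portfolio", "linkedin", "volunteer", "publication"]
  let found : Int := (keywords.map (fun k => if PySem.Str.isIn k tl then (1 : Int) else 0)).sum
  min (score + 3 * min found 5) 100

-- ===== PRECONDITION & SPEC =====
def Spec_calculate_resume_strength (skills : List String) (education : List String) (experience : List String) (text : String) (out : Int) : Prop := out = calculate_resume_strength_alt skills education experience text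
instance (skills : List String) (education : List String) (experience : List String) (text : String) (out : Int) : Decidable (Spec_calculate_resume_strength skills education experience text out) := by unfold Spec_calculate_resume_strength; infer_instance

-- ===== CLAIM =====
def Claim_equal_calculate_resume_strength : Prop := ∀ (skills : List String) (education : List String) (experience : List String) (text : String), Dom_calculate_resume_strength skills education experience text → Spec_calculate_resume_strength skills education experience text (calculate_resume_strength skills education experience text)

-- ===== LEMMAS AND PROOFS =====
theorem foldl_count_eq_sum_map (l : List String) (t : String) :
    l.foldl (fun acc k => if PySem.Str.isIn k t then acc + 1 else acc) (0 : Int)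
      = (l.map (fun k => if PySem.Str.isIn k t then (1 : Int) else 0)).sum := by
  rw [PySem.List.foldl_if_add_one, PySem.List.sum_map_ite_one_zero]
  simp

theorem inc1 (n : Int) :
    (if n ≥ 10 then (40 : Int) else if n ≥ 7 then 30 else if n ≥ 4 then 20
     else if n ≥ 1 then 10 else 0)
      = ((([((1:Int),(10:Int)),(4,10),(7,10),(10,10)].filter (fun tp => n ≥ tp.1)).map Prod.snd)).sum := by
  by_cases h1 : (1:Int) ≤ n <;> by_cases h4 : (4:Int) ≤ n <;> by_cases h7 : (7:Int) ≤ n <;>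
    by_cases h10 : (10:Int) ≤ n <;>
      simp [List.filter, ge_iff_le, h1, h4, h7, h10] <;> omega

theorem inc2 (n : Int) :
    (if n ≥ 3 then (20 : Int) else if n ≥ 2 then 15 else if n ≥ 1 then 10 else 0)
      = ((([((1:Int),(10:Int)),(2,5),(3,5)].filter (fun tp => n ≥ tp.1)).map Prod.snd)).sum := by
  by_cases h1 : (1:Int) ≤ n <;> by_cases h2 : (2:Int) ≤ n <;> by_cases h3 : (3:Int) ≤ n <;>
    simp [List.filter, ge_iff_le, h1, h2, h3] <;> omega

theorem inc3 (n : Int) :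
    (if n ≥ 5 then (25 : Int) else if n ≥ 3 then 18 else if n ≥ 1 then 10 else 0)
      = ((([((1:Int),(10:Int)),(3,8),(5,7)].filter (fun tp => n ≥ tp.1)).map Prod.snd)).sum := by
  by_cases h1 : (1:Int) ≤ n <;> by_cases h3 : (3:Int) ≤ n <;> by_cases h5 : (5:Int) ≤ n <;>
    simp [List.filter, ge_iff_le, h1, h3, h5] <;> omega

theorem min_mul3 (f : Int) : min (f * 3) 15 = 3 * min f 5 := by omega

-- ===== VERDICT =====
set_option maxHeartbeats 1000000 in
theorem calculate_resume_strength_spec : Claim_equal_calculate_resume_strength := by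
  intro skills education experience text _
  simp only [Spec_calculate_resume_strength, calculate_resume_strength,
    calculate_resume_strength_alt, foldl_count_eq_sum_map, min_mul3,
    List.flatMap_cons, List.flatMap_nil, List.append_nil, List.sum_append]
  rw [← inc1, ← inc2, ← inc3]
  split_ifs <;> omega
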